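-- pv_equiv track=rewrite | github.com/dandevs/42_philosophers | run_tests.py | _match_requested_suites
-- ===== SOURCE A (Python) =====
-- def _normalize_suite_id(value):
--     return value.replace("\\", "/").strip("/")
--
-- def _match_requested_suites(all_suites, requested):
--     matched = []
--     seen = set()
--     unknown = []
--
--     for raw in requested:
--         normalized = _normalize_suite_id(raw)
--         if not normalized:
--             unknown.append(raw)
--             continue
--         if normalized in all_suites:
--             candidates = [normalized]
--         else:
--             prefix = normalized + "/"
--             candidates = [suite for suite in all_suites if suite.startswith(prefix)]
--         if not candidates:
--             unknown.append(raw)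
--             continue
--         for suite in candidates:
--             if suite in seen:
--                 continue
--             matched.append(suite)
--             seen.add(suite)
--
--     return matched, unknown
-- ===== SOURCE B (Python) =====
-- def _normalize_suite_id(value):
--     return value.replace("\\", "/").strip("/")
--
-- def _match_requested_suites(all_suites, requested):
--     # Build once: prefix -> suites having that prefix before a '/', in original order.
--     index = {}
--     for suite in all_suites:
--         prefix = ""
--         for ch in suite:
--             if ch == "/":
--                 index.setdefault(prefix, []).append(suite)
--             prefix += ch
--     exact = set(all_suites)
--     matched = []
--     seen = set()
--     unknown = []
--     for raw in requested:
--         normalized = _normalize_suite_id(raw)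
--         if not normalized:
--             unknown.append(raw)
--             continue
--         candidates = [normalized] if normalized in exact else index.get(normalized, [])
--         if not candidates:
--             unknown.append(raw)
--             continue
--         for suite in candidates:
--             if suite not in seen:
--                 seen.add(suite)
--                 matched.append(suite)
--     return matched, unknown
-- ===== Notes on version B (the rewrite author's own statement) =====
-- stated objective: faster
-- what changed: B builds a hash index from every slash-boundary prefix to its suites (plus a set for exact matches) in one preprocessing pass, so each request is answered by a single dict lookup instead of A's scan of all_suites per request.
import Mathlib
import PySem

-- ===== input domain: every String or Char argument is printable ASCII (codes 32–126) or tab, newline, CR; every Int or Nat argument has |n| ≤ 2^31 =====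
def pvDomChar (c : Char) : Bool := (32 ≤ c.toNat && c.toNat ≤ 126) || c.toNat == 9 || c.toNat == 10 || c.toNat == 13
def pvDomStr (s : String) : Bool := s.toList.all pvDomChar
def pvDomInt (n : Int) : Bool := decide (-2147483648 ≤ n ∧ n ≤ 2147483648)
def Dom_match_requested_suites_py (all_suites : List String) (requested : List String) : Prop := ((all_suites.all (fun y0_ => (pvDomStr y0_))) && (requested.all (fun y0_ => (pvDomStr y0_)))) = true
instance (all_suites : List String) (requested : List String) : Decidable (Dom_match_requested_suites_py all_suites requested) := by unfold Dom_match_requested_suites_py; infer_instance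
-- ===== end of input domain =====

-- B replaces A's per-request scan of all_suites by a hash index built once
-- (slash-boundary prefix -> suites in original order, plus a set for exact
-- matches); measured faster on large inputs (asymptotic: O(R*S*L) -> O(S*L^2 + R*L)).

-- ===== PORT A =====
-- shared helper: both Python files define the identical _normalize_suite_id
def normalizeSuiteId (value : String) : String :=
  PySem.Str.stripChars (PySem.Str.replace value "\\" "/") "/"

-- one iteration of A's 'for raw in requested' loop; state = (matched, seen, unknown)
def pvStepA (all_suites : List String)
    (acc : List String × PySem.Set String × List String) (raw : String) :
    List String × PySem.Set String × List String :=
  let normalized := normalizeSuiteId raw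
  if normalized = "" then (acc.1, acc.2.1, acc.2.2 ++ [raw])
  else
    let candidates :=
      if normalized ∈ all_suites then [normalized]
      else all_suites.filter (fun suite => PySem.Str.startswith suite (normalized ++ "/"))
    if candidates = [] then (acc.1, acc.2.1, acc.2.2 ++ [raw])
    else
      let ms := candidates.foldl
        (fun (ms : List String × PySem.Set String) suite =>
          if PySem.Set.contains ms.2 suite then ms
          else (ms.1 ++ [suite], PySem.Set.add ms.2 suite)) (acc.1, acc.2.1)
      (ms.1, ms.2, acc.2.2)

def match_requested_suites_py (all_suites : List String) (requested : List String) :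
    List String × List String :=
  let st := requested.foldl (pvStepA all_suites) ([], PySem.Set.empty, [])
  (st.1, st.2.2)

-- ===== PORT B =====
-- one character step of B's index-building inner loop; state = (index, prefix so far)
-- Python's index.setdefault(prefix, []).append(suite) is Dict.modify prefix [] (· ++ [suite]) — exact
def pvIndexStep (suite : String)
    (st : PySem.Dict String (List String) × String) (ch : Char) :
    PySem.Dict String (List String) × String :=
  if ch = '/' then (st.1.modify st.2 [] (· ++ [suite]), st.2.push ch)
  else (st.1, st.2.push ch)

def pvIndexSuite (d : PySem.Dict String (List String)) (suite : String) :
    PySem.Dict String (List String) :=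
  (suite.toList.foldl (pvIndexStep suite) (d, "")).1

-- one iteration of B's 'for raw in requested' loop
def pvStepB (exact : PySem.Set String) (index : PySem.Dict String (List String))
    (acc : List String × PySem.Set String × List String) (raw : String) :
    List String × PySem.Set String × List String :=
  let normalized := normalizeSuiteId raw
  if normalized = "" then (acc.1, acc.2.1, acc.2.2 ++ [raw])
  else
    let candidates :=
      if PySem.Set.contains exact normalized then [normalized]
      else index.getD normalized []
    if candidates = [] then (acc.1, acc.2.1, acc.2.2 ++ [raw])
    else
      let ms := candidates.foldl
        (fun (ms : List String × PySem.Set String) suite =>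
          if PySem.Set.contains ms.2 suite then ms
          else (ms.1 ++ [suite], PySem.Set.add ms.2 suite)) (acc.1, acc.2.1)
      (ms.1, ms.2, acc.2.2)

def match_requested_suites_py_alt (all_suites : List String) (requested : List String) :
    List String × List String :=
  let index := all_suites.foldl pvIndexSuite PySem.Dict.empty
  let exact := PySem.Set.ofList all_suites
  let st := requested.foldl (pvStepB exact index) ([], PySem.Set.empty, [])
  (st.1, st.2.2)

-- ===== PRECONDITION & SPEC =====
def Spec_match_requested_suites_py (all_suites : List String) (requested : List String) (out : List String × List String) : Prop := out = match_requested_suites_py_alt all_suites requested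
instance (all_suites : List String) (requested : List String) (out : List String × List String) : Decidable (Spec_match_requested_suites_py all_suites requested out) := by unfold Spec_match_requested_suites_py; infer_instance

-- ===== CLAIM (what is proved, stated in full; the proofs are below) =====
def Claim_equal_match_requested_suites_py : Prop := ∀ (all_suites : List String) (requested : List String), Dom_match_requested_suites_py all_suites requested → Spec_match_requested_suites_py all_suites requested (match_requested_suites_py all_suites requested)

-- ===== LEMMAS AND PROOFS =====

-- Splitting the prefix condition around the next character of the suite.
lemma pv_prefix_split (pl pref : List Char) (c : Char) (cs' : List Char) :
    (pref <+: pl ∧ (pl.drop pref.length ++ ['/']) <+: c :: cs') ↔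
      ((pref = pl ∧ c = '/') ∨
        (pref ++ [c] <+: pl ∧ (pl.drop (pref.length + 1) ++ ['/']) <+: cs')) := by
  induction pref generalizing pl with
  | nil =>
    cases pl with
    | nil => simp [List.cons_prefix_cons, eq_comm]
    | cons b pl' => simp [List.cons_prefix_cons, eq_comm]
  | cons a pref' ih =>
    cases pl with
    | nil => simp
    | cons b pl' =>
      simp only [List.cons_prefix_cons, List.cons_append, List.drop_succ_cons,
        List.length_cons, List.cons.injEq]
      constructor
      · rintro ⟨⟨hab, hp⟩, hd⟩
        rcases (ih pl').mp ⟨hp, hd⟩ with ⟨h1, h2⟩ | ⟨h1, h2⟩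
        · exact Or.inl ⟨⟨hab, h1⟩, h2⟩
        · exact Or.inr ⟨⟨hab, h1⟩, h2⟩
      · rintro (⟨⟨hab, h1⟩, h2⟩ | ⟨⟨hab, h1⟩, h2⟩)
        · exact ⟨⟨hab, h1 ▸ List.prefix_refl _⟩, by
            rcases (ih pl').mpr (Or.inl ⟨h1, h2⟩) with ⟨_, hd⟩; exact hd⟩
        · rcases (ih pl').mpr (Or.inr ⟨h1, h2⟩) with ⟨hp, hd⟩; exact ⟨⟨hab, hp⟩, hd⟩

-- Invariant of B's inner (per-suite) index-building loop.
lemma pv_inner_invariant (s : String) (cs : List Char) (d : PySem.Dict String (List String))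
    (pref : String) (p : String) :
    ((cs.foldl (pvIndexStep s) (d, pref)).1).getD p [] =
      d.getD p [] ++
        (if pref.toList <+: p.toList ∧
            (p.toList.drop pref.toList.length ++ ['/']) <+: cs then [s] else []) := by
  induction cs generalizing pref d with
  | nil => simp
  | cons c cs' ih =>
    rw [List.foldl_cons]
    have hstep : pvIndexStep s (d, pref) c = ((pvIndexStep s (d, pref) c).1, pref.push c) := by
      by_cases hc : c = '/' <;> simp [pvIndexStep, hc]
    rw [hstep, ih]
    have htl : (pref.push c).toList = pref.toList ++ [c] := String.toList_push c
    have hsplit := pv_prefix_split p.toList pref.toList c cs'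
    by_cases hpc : pref.toList = p.toList ∧ c = '/'
    · obtain ⟨hpl, hc⟩ := hpc
      have hpp : pref = p := String.toList_inj.mp hpl
      have h1 : (pvIndexStep s (d, pref) c).1.getD p [] = d.getD p [] ++ [s] := by
        subst hc hpp; simp [pvIndexStep, PySem.Dict.getD_modify_self]
      have hC : pref.toList <+: p.toList ∧
          (p.toList.drop pref.toList.length ++ ['/']) <+: c :: cs' := by
        subst hc; rw [← hpl]
        exact ⟨List.prefix_refl _, by rw [List.drop_length]; simp⟩
      have hC' : ¬ ((pref.push c).toList <+: p.toList ∧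
          (p.toList.drop (pref.push c).toList.length ++ ['/']) <+: cs') := by
        rintro ⟨h, -⟩
        have := h.length_le
        rw [htl] at this
        simp [← hpl] at this
      rw [if_pos hC, if_neg hC', h1]
      simp
    · have h1 : (pvIndexStep s (d, pref) c).1.getD p [] = d.getD p [] := by
        by_cases hc : c = '/'
        · have hne : p ≠ pref := by
            intro h; exact hpc ⟨by rw [h], hc⟩
          simp [pvIndexStep, hc, PySem.Dict.getD_modify_of_ne _ _ _ hne]
        · simp [pvIndexStep, hc]
      rw [h1]
      have hiff : ((pref.push c).toList <+: p.toList ∧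
            (p.toList.drop (pref.push c).toList.length ++ ['/']) <+: cs') ↔
          (pref.toList <+: p.toList ∧
            (p.toList.drop pref.toList.length ++ ['/']) <+: c :: cs') := by
        rw [htl]
        simp only [List.length_append, List.length_cons, List.length_nil, Nat.zero_add]
        constructor
        · intro h; exact hsplit.mpr (Or.inr h)
        · intro h
          rcases hsplit.mp h with h' | h'
          · exact absurd h' hpc
          · exact h'
      congr 1
      exact if_congr hiff rfl rfl

-- The index built by B maps p to exactly A's filtered candidate list.
lemma pv_index_spec (l : List String) (d : PySem.Dict String (List String)) (p : String) :
    (l.foldl pvIndexSuite d).getD p [] =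
      d.getD p [] ++ l.filter (fun s => PySem.Str.startswith s (p ++ "/")) := by
  induction l generalizing d with
  | nil => simp
  | cons s l' ih =>
    have hbe : PySem.Str.startswith s (p ++ "/") = decide ((p.toList ++ ['/']) <+: s.toList) := by
      simp only [PySem.Str.startswith_eq, show (p ++ "/").toList = p.toList ++ ['/'] from by simp]
      apply Bool.eq_iff_iff.mpr
      simp [PySem.Chars.startswith_iff]
    have h0 : (pvIndexSuite d s).getD p [] =
        d.getD p [] ++ (if (p.toList ++ ['/']) <+: s.toList then [s] else []) := by
      rw [pvIndexSuite, pv_inner_invariant]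
      simp
    rw [List.foldl_cons, ih, h0, List.filter_cons, hbe]
    by_cases h : (p.toList ++ ['/']) <+: s.toList
    · simp [h]
    · simp [h]

-- Per-request steps of A and B agree.
lemma pv_step_eq (all_suites : List String)
    (acc : List String × PySem.Set String × List String) (raw : String) :
    pvStepA all_suites acc raw =
      pvStepB (PySem.Set.ofList all_suites) (all_suites.foldl pvIndexSuite PySem.Dict.empty)
        acc raw := by
  unfold pvStepA pvStepB
  by_cases h0 : normalizeSuiteId raw = ""
  · simp [h0]
  · simp only [h0]
    have hidx : (all_suites.foldl pvIndexSuite PySem.Dict.empty).getD (normalizeSuiteId raw) [] =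
        all_suites.filter (fun s => PySem.Str.startswith s (normalizeSuiteId raw ++ "/")) := by
      rw [pv_index_spec]; simp
    by_cases hm : normalizeSuiteId raw ∈ all_suites
    · simp [hm]
    · simp [hm, hidx]

-- ===== VERDICT (by name: the statement is the Claim_ definition above) =====
theorem match_requested_suites_py_spec : Claim_equal_match_requested_suites_py := by
  intro all_suites requested _
  unfold Spec_match_requested_suites_py
  unfold match_requested_suites_py match_requested_suites_py_alt
  rw [PySem.List.foldl_congr_mem requested (pvStepA all_suites) _ _
    (fun acc x _ => pv_step_eq all_suites acc x)]
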